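-- pv_equiv track=rewrite | github.com/LumIT-Automation/api-f5 | f5/models/F5/ASM/backend/PolicyDiffManager.py | __differencesOrderByType
-- ===== SOURCE A (Python) =====
-- from typing import List, Dict
--
-- def __differencesOrderByType(differences: list) -> dict:
--     diffs: Dict[str, List[dict]] = {}
--
--     try:
--
--         for el in differences:
--             entityType = el["entityType"]
--             if entityType not in diffs:
--                 diffs[entityType] = []
--
--             del(el["entityType"])
--             diffs[entityType].append(el)
--
--         return diffs
--     except Exception as e:
--         raise e
-- ===== SOURCE B (Python) =====
-- def __differencesOrderByType(differences: list) -> dict: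
--     # Tag-then-group: strip the entityType of every element once (pop mutates,
--     # like A's del), list the distinct types in first-occurrence order, then
--     # build each group by one filtering pass per type.
--     tagged = [(el.pop("entityType"), el) for el in differences]
--     order = list(dict.fromkeys(k for k, _ in tagged))
--     return {k: [el for k2, el in tagged if k2 == k] for k in order}
-- ===== Notes on version B (the rewrite author's own statement) =====
-- stated objective: alternative
-- what changed: Replaces A's single-pass hash-bucketing (insert-empty-then-append per element) with a tag-then-group decomposition: strip entityType from every element in one tagging pass, list the distinct types in first-occurrence order, then build each group by a filtering pass per type.
import Mathlib
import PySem

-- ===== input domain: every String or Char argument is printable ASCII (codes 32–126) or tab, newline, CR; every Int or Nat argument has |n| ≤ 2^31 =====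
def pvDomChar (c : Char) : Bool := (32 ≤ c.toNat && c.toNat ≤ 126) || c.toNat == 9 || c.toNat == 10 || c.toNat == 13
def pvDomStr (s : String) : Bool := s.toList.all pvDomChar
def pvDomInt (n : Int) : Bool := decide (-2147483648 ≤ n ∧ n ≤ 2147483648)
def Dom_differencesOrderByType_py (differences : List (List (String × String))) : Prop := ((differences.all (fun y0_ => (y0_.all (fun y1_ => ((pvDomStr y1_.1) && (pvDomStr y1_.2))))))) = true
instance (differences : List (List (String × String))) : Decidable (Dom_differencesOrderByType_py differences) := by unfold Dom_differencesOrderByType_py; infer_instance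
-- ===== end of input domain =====

-- B replaces A's single-pass hash-bucketing by tag-then-group (distinct types in
-- first-occurrence order, one filtering pass per type); same return value — like A
-- it strips 'entityType' from the element dicts (both mutate them in Python).


-- ===== PORT A =====
-- A: for each element, look up entityType, create the bucket if absent, delete the
-- key and append the element; return the dict's items. The 'none' branch is the
-- KeyError case, excluded by Pre_.
def differencesOrderByType_py (differences : List (List (String × String))) : List (String × List (List (String × String))) :=
  (differences.foldl
    (fun (diffs : PySem.Dict String (List (List (String × String)))) el =>
      match (PySem.Dict.mk el).get? "entityType" with
      | none => diffs
      | some t =>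
        let diffs := if diffs.contains t then diffs else diffs.insert t []
        let el' := ((PySem.Dict.mk el).erase "entityType").items
        diffs.modify t [] (fun l => l ++ [el']))
    PySem.Dict.empty).items

-- ===== PORT B =====
-- B: tag each element with its popped entityType (filterMap: the none/KeyError case
-- is excluded by Pre_), dedup the tags in first-occurrence order, filter per tag.
def differencesOrderByType_py_alt (differences : List (List (String × String))) : List (String × List (List (String × String))) :=
  let tagged := differences.filterMap
    (fun el => ((PySem.Dict.mk el).get? "entityType").map
      (fun t => (t, ((PySem.Dict.mk el).erase "entityType").items)))
  let order := PySem.List.dedup (tagged.map (·.1))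
  order.map (fun k => (k, (tagged.filter (fun p => p.1 == k)).map (·.2)))

-- ===== PRECONDITION & SPEC =====
-- Pre_ excludes exactly the inputs where some element dict lacks the key
-- "entityType": there Python A raises KeyError (and B raises too).
def Pre_differencesOrderByType_py (differences : List (List (String × String))) : Prop :=
  (differences.all (fun el => el.any (fun p => p.1 == "entityType"))) = true
instance (differences : List (List (String × String))) : Decidable (Pre_differencesOrderByType_py differences) := by unfold Pre_differencesOrderByType_py; infer_instance

def pvWitness_differencesOrderByType_py : (List (List (String × String))) :=
  [[("entityType", "a"), ("x", "1")], [("entityType", "b")], [("entityType", "a"), ("y", "2")]]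

def Spec_differencesOrderByType_py (differences : List (List (String × String))) (out : List (String × List (List (String × String)))) : Prop := out = differencesOrderByType_py_alt differences
instance (differences : List (List (String × String))) (out : List (String × List (List (String × String)))) : Decidable (Spec_differencesOrderByType_py differences out) := by unfold Spec_differencesOrderByType_py; infer_instance

-- ===== CLAIM (what is proved, stated in full; the proofs are below) =====
def Claim_equal_differencesOrderByType_py : Prop := ∀ (differences : List (List (String × String))), Dom_differencesOrderByType_py differences → Pre_differencesOrderByType_py differences → Spec_differencesOrderByType_py differences (differencesOrderByType_py differences)

-- ===== LEMMAS AND PROOFS =====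

-- A's "insert empty bucket if absent, then append" is one Dict.modify.
theorem stepA_eq_modify (d : PySem.Dict String (List (List (String × String))))
    (t : String) (f : List (List (String × String)) → List (List (String × String))) :
    (if d.contains t then d else d.insert t []).modify t [] f = d.modify t [] f := by
  by_cases h : d.contains t = true
  · simp [h]
  · have h' : d.contains t = false := by simpa using h
    simp [h', PySem.Dict.modify, PySem.Dict.getD_insert_self, PySem.Dict.insert_insert_self,
      PySem.Dict.getD_of_not_contains d [] h']

-- Under Pre_, A's fold over the elements is the same fold over B's tagged list.
theorem foldA_eq_fold_tagged (l : List (List (String × String)))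
    (hpre : (l.all (fun el => el.any (fun p => p.1 == "entityType"))) = true)
    (d : PySem.Dict String (List (List (String × String)))) :
    l.foldl
      (fun diffs el =>
        match (PySem.Dict.mk el).get? "entityType" with
        | none => diffs
        | some t =>
          let diffs := if diffs.contains t then diffs else diffs.insert t []
          let el' := ((PySem.Dict.mk el).erase "entityType").items
          diffs.modify t [] (fun l => l ++ [el']))
      d
    = (l.filterMap
        (fun el => ((PySem.Dict.mk el).get? "entityType").map
          (fun t => (t, ((PySem.Dict.mk el).erase "entityType").items)))).foldl
        (fun diffs p => diffs.modify p.1 [] (fun l => l ++ [p.2])) d := by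
  induction l generalizing d with
  | nil => rfl
  | cons el rest ih =>
    simp only [List.all_cons, Bool.and_eq_true] at hpre
    obtain ⟨hel, hrest⟩ := hpre
    have hk : ((PySem.Dict.mk el).get? "entityType").isSome = true := by
      rw [← PySem.Dict.contains_eq_isSome_get?]
      simp [PySem.Dict.contains_mk]
      rcases List.any_eq_true.mp hel with ⟨p, hp, he⟩
      exact ⟨p.2, by rw [← eq_of_beq he]; simpa using hp⟩
    obtain ⟨t, ht⟩ := Option.isSome_iff_exists.mp hk
    simp only [List.foldl_cons, List.filterMap_cons, ht, Option.map_some]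
    rw [stepA_eq_modify]
    exact ih hrest _

-- ===== VERDICT (by name: the statement is the Claim_ definition above) =====
theorem differencesOrderByType_py_spec : Claim_equal_differencesOrderByType_py := by
  intro differences _ hpre
  unfold Spec_differencesOrderByType_py differencesOrderByType_py differencesOrderByType_py_alt
  rw [foldA_eq_fold_tagged differences hpre]
  set ts := differences.filterMap
    (fun el => ((PySem.Dict.mk el).get? "entityType").map
      (fun t => (t, ((PySem.Dict.mk el).erase "entityType").items))) with hts
  have hnd : (ts.foldl (fun diffs p => diffs.modify p.1 [] (fun l => l ++ [p.2]))
      PySem.Dict.empty).keys.Nodup :=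
    PySem.Dict.nodup_keys_foldl_modify_key ts Prod.fst [] (fun _ p => fun l => l ++ [p.2]) _
      PySem.Dict.nodup_keys_empty
  rw [PySem.Dict.items_eq_map_keys _ hnd []]
  rw [PySem.Dict.keys_foldl_modify_key]
  simp only [PySem.Dict.keys_empty, PySem.Set.update_nil_left, ← PySem.List.dedup_eq_ofList]
  apply List.map_congr_left
  intro k _
  rw [PySem.Dict.getD_foldl_modify_append]
  simp [PySem.Dict.getD_empty]
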